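-- pv_equiv track=rewrite | github.com/di3g0r/Lexer | lexer.py | dfa_string_run
-- ===== SOURCE A (Python) =====
-- def _classify_string(ch, open_quote):
--     if ch == open_quote:
--         return "open"
--     if ch == "\\":
--         return "escape"
--     return "other"
--
-- def dfa_string_run(text, pos):
--     """
--     Ejecuta DFA_STRING con manejo especial de comilla de apertura.
--     El tipo de comilla (simple o doble) se fija al leer el primer char.
--     """
--     if pos >= len(text):
--         return None, None
--     open_quote = text[pos]
--     if open_quote not in ('"', "'"):
--         return None, None
--
--     state = "OPEN_D" if open_quote == '"' else "OPEN_S"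
--     esc_state = "ESC_D" if open_quote == '"' else "ESC_S"
--     i = pos + 1  # ya consumimos la comilla de apertura
--
--     while i < len(text):
--         ch = text[i]
--         cls = _classify_string(ch, open_quote)
--         if state in ("OPEN_D", "OPEN_S"):
--             if cls == "open":
--                 # cerró la cadena
--                 return "STRING", text[pos:i + 1]
--             elif cls == "escape":
--                 state = esc_state
--             # else: sigue en el mismo estado
--         elif state in ("ESC_D", "ESC_S"):
--             # el char tras \ se consume siempre, volvemos al estado normal
--             state = "OPEN_D" if open_quote == '"' else "OPEN_S"
--         i += 1
--
--     # Si llegamos aquí, la cadena nunca se cerró es decir error léxico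
--     # Devolvemos "ERROR" con todo lo que se consumió
--     # avanzamos la posición correctamente y no reescaneamos los chars internos.
--     return "ERROR", text[pos:i]
-- ===== SOURCE B (Python) =====
-- def _find_close(text, quote, i):
--     """Return the index of the unescaped closing quote, or None if the
--     string is never closed.  Escaped characters are skipped with i += 2."""
--     while i < len(text):
--         ch = text[i]
--         if ch == "\\":
--             i += 2
--         elif ch == quote:
--             return i
--         else:
--             i += 1
--     return None
--
-- def dfa_string_run(text, pos):
--     """Locate the closing quote with a helper, then build the token slices."""
--     if pos >= len(text):
--         return None, None
--     quote = text[pos]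
--     if quote != '"' and quote != "'":
--         return None, None
--     end = _find_close(text, quote, pos + 1)
--     if end is None:
--         return "ERROR", text[pos:]
--     return "STRING", text[pos:end + 1]
-- ===== Notes on version B (the rewrite author's own statement) =====
-- stated objective: simpler
-- what changed: Replaced the named-state DFA (OPEN_D/OPEN_S/ESC_D/ESC_S with a classifier helper and result construction inside the loop) by a helper that only returns the index of the unescaped closing quote (skipping an escaped character with i += 2, no state variable), with the STRING/ERROR result assembled from slices outside the loop.
import Mathlib
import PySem

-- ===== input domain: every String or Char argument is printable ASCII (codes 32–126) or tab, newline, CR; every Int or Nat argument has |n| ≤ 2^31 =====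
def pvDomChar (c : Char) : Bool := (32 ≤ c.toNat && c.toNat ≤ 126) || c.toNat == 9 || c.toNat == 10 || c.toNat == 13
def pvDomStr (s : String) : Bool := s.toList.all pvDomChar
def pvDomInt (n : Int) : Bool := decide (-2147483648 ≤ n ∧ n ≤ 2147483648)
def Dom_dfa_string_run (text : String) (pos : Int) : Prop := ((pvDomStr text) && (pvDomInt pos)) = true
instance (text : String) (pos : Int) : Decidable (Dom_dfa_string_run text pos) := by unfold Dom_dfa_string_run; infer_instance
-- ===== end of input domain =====

-- B drops A's named-state DFA: a helper merely returns the index of the unescaped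
-- closing quote (escapes skipped with i + 2, no state variable), and the
-- STRING/ERROR token is assembled from slices outside the loop (objective: simpler).

-- ===== PORT A =====
def pvClassifyString (ch open_quote : Char) : String :=
  if ch = open_quote then "open"
  else if ch = '\\' then "escape"
  else "other"

-- A's while-loop; state/esc_state carried exactly as in the Python.
def pvDfaLoopA (text : String) (pos : Int) (open_quote : Char)
    (esc_state state : String) (i : Int) : Option String × Option String :=
  if _h : i < PySem.Str.len text then
    match PySem.Str.pyGet? text i with
    | none => (none, none)  -- text[i] raises IndexError here (outside Pre_)
    | some ch =>
      let cls := pvClassifyString ch open_quote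
      if state = "OPEN_D" ∨ state = "OPEN_S" then
        if cls = "open" then
          (some "STRING", some (PySem.Str.slice text (some pos) (some (i + 1))))
        else if cls = "escape" then
          pvDfaLoopA text pos open_quote esc_state esc_state (i + 1)
        else
          pvDfaLoopA text pos open_quote esc_state state (i + 1)
      else if state = "ESC_D" ∨ state = "ESC_S" then
        pvDfaLoopA text pos open_quote esc_state
          (if open_quote = '"' then "OPEN_D" else "OPEN_S") (i + 1)
      else
        pvDfaLoopA text pos open_quote esc_state state (i + 1)
  else
    (some "ERROR", some (PySem.Str.slice text (some pos) (some i)))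
termination_by (PySem.Str.len text - i).toNat
decreasing_by all_goals (simp only [PySem.Str.len_eq] at *; omega)

def dfa_string_run (text : String) (pos : Int) : Option String × Option String :=
  if pos ≥ PySem.Str.len text then (none, none)
  else
    match PySem.Str.pyGet? text pos with
    | none => (none, none)  -- text[pos] raises IndexError here (outside Pre_)
    | some open_quote =>
      if ¬ (open_quote = '"' ∨ open_quote = '\'') then (none, none)
      else
        pvDfaLoopA text pos open_quote
          (if open_quote = '"' then "ESC_D" else "ESC_S")
          (if open_quote = '"' then "OPEN_D" else "OPEN_S")
          (pos + 1)

-- ===== PORT B =====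
-- B's helper: index of the unescaped closing quote, or none if never closed.
def pvFindClose (text : String) (quote : Char) (i : Int) : Option Int :=
  if _h : i < PySem.Str.len text then
    match PySem.Str.pyGet? text i with
    | none => none  -- text[i] raises IndexError here (outside Pre_)
    | some ch =>
      if ch = '\\' then pvFindClose text quote (i + 2)
      else if ch = quote then some i
      else pvFindClose text quote (i + 1)
  else none
termination_by (PySem.Str.len text - i).toNat
decreasing_by all_goals (simp only [PySem.Str.len_eq] at *; omega)

def dfa_string_run_alt (text : String) (pos : Int) : Option String × Option String :=
  if pos ≥ PySem.Str.len text then (none, none)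
  else
    match PySem.Str.pyGet? text pos with
    | none => (none, none)  -- text[pos] raises IndexError here (outside Pre_)
    | some quote =>
      if quote ≠ '"' ∧ quote ≠ '\'' then (none, none)
      else
        match pvFindClose text quote (pos + 1) with
        | none => (some "ERROR", some (PySem.Str.slice text (some pos) none))
        | some e => (some "STRING", some (PySem.Str.slice text (some pos) (some (e + 1))))

-- ===== PRECONDITION & SPEC =====
-- Pre_ excludes exactly pos < -len(text), where A's text[pos] raises IndexError.
def Pre_dfa_string_run (text : String) (pos : Int) : Prop :=
  -PySem.Str.len text ≤ pos
instance (text : String) (pos : Int) : Decidable (Pre_dfa_string_run text pos) := by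
  unfold Pre_dfa_string_run; infer_instance

def pvWitness_dfa_string_run : String × Int := ("\"ab\"", 0)

def Spec_dfa_string_run (text : String) (pos : Int) (out : Option String × Option String) : Prop := out = dfa_string_run_alt text pos
instance (text : String) (pos : Int) (out : Option String × Option String) : Decidable (Spec_dfa_string_run text pos out) := by unfold Spec_dfa_string_run; infer_instance

-- ===== CLAIM (what is proved, stated in full; the proofs are below) =====
def Claim_equal_dfa_string_run : Prop := ∀ (text : String) (pos : Int), Dom_dfa_string_run text pos → Pre_dfa_string_run text pos → Spec_dfa_string_run text pos (dfa_string_run text pos)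

-- ===== LEMMAS AND PROOFS =====

-- A slice whose stop bound is past the end equals the unbounded slice.
lemma pvSlice_all (text : String) (p b : Int)
    (hb : PySem.Str.len text ≤ b) :
    PySem.Str.slice text (some p) (some b) = PySem.Str.slice text (some p) none := by
  have h : (PySem.Str.slice text (some p) (some b)).toList
      = (PySem.Str.slice text (some p) none).toList := by
    simp only [PySem.Str.toList_slice, PySem.Chars.slice_eq_listSlice,
      PySem.Str.len_eq] at *
    have hcb : PySem.List.clampIdx text.toList.length b = text.toList.length := by
      simp only [PySem.List.clampIdx]; split_ifs <;> omega
    simp only [PySem.List.slice, hcb]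
  exact String.ext (by simpa [String.toList] using h)

lemma pvGet_isSome (text : String) (i : Int)
    (h1 : -PySem.Str.len text ≤ i) (h2 : i < PySem.Str.len text) :
    ∃ ch, PySem.Str.pyGet? text i = some ch := by
  simp only [PySem.Str.len_eq] at h1 h2
  rcases h : PySem.Str.pyGet? text i with _ | ch
  · exfalso
    rw [PySem.Str.pyGet?_eq, PySem.Chars.pyGet?_eq_listPyGet?,
      PySem.List.pyGet?_eq_none_iff] at h
    exact h (by constructor <;> omega)
  · exact ⟨ch, rfl⟩

-- A's loop computes exactly what B assembles from pvFindClose's answer.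
lemma pvLoop_eq (text : String) (pos : Int) (oq : Char)
    (hq : oq = '"' ∨ oq = '\'') (escS stateS : String)
    (hE : escS = "ESC_D" ∨ escS = "ESC_S")
    (hO : stateS = "OPEN_D" ∨ stateS = "OPEN_S")
    (hrec : (if oq = '"' then "OPEN_D" else "OPEN_S") = stateS) :
    ∀ (n : Nat) (i : Int), -PySem.Str.len text ≤ i →
      (PySem.Str.len text - i).toNat ≤ n →
      pvDfaLoopA text pos oq escS stateS i =
        (match pvFindClose text oq i with
         | none => (some "ERROR", some (PySem.Str.slice text (some pos) none))
         | some e => (some "STRING", some (PySem.Str.slice text (some pos) (some (e + 1))))) := by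
  have hqb : oq ≠ '\\' := by rcases hq with h | h <;> simp [h]
  have hEO : ¬ (escS = "OPEN_D" ∨ escS = "OPEN_S") := by
    rcases hE with h | h <;> simp [h]
  intro n
  induction n with
  | zero =>
    intro i h1 h2
    have hge : ¬ i < PySem.Str.len text := by
      simp only [PySem.Str.len_eq] at *; omega
    rw [pvDfaLoopA, pvFindClose, dif_neg hge, dif_neg hge,
      pvSlice_all text pos i (by omega)]
  | succ n ih =>
    intro i h1 h2
    by_cases hlt : i < PySem.Str.len text
    · obtain ⟨ch, hch⟩ := pvGet_isSome text i h1 hlt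
      rw [pvDfaLoopA, pvFindClose, dif_pos hlt, dif_pos hlt, hch]
      simp only [if_pos hO]
      by_cases hcq : ch = oq
      · -- closing quote: A returns the token, pvFindClose returns some i
        have hcb : ch ≠ '\\' := by rw [hcq]; exact hqb
        have hcls : pvClassifyString ch oq = "open" := by
          simp [pvClassifyString, hcq]
        rw [hcls, if_pos rfl, if_neg hcb, if_pos hcq]
      · by_cases hcb : ch = '\\'
        · -- escape: A takes two loop steps, pvFindClose jumps i + 2
          have hcls : pvClassifyString ch oq = "escape" := by
            unfold pvClassifyString; rw [if_neg hcq, if_pos hcb]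
          rw [hcls, if_neg (by decide : ¬ ("escape" : String) = "open"),
            if_pos rfl, if_pos hcb, pvDfaLoopA]
          by_cases hlt2 : i + 1 < PySem.Str.len text
          · rw [dif_pos hlt2]
            obtain ⟨ch2, hch2⟩ := pvGet_isSome text (i + 1) (by omega) hlt2
            rw [hch2]
            simp only [if_neg hEO, if_pos hE, hrec]
            have e : i + 1 + 1 = i + 2 := by omega
            rw [e]
            exact ih (i + 2) (by omega)
              (by simp only [PySem.Str.len_eq] at *; omega)
          · rw [dif_neg hlt2, pvFindClose,
              dif_neg (by simp only [PySem.Str.len_eq] at *; omega :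
                ¬ i + 2 < PySem.Str.len text),
              pvSlice_all text pos (i + 1) (by omega)]
        · -- ordinary character: both advance by one
          have hcls : pvClassifyString ch oq = "other" := by
            simp [pvClassifyString, hcq, hcb]
          rw [hcls, if_neg (by decide : ¬ ("other" : String) = "open"),
            if_neg (by decide : ¬ ("other" : String) = "escape"),
            if_neg hcb, if_neg hcq]
          exact ih (i + 1) (by omega)
            (by simp only [PySem.Str.len_eq] at *; omega)
    · rw [pvDfaLoopA, pvFindClose, dif_neg hlt, dif_neg hlt,
        pvSlice_all text pos i (by simp only [PySem.Str.len_eq] at *; omega)]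

-- ===== VERDICT (by name: the statement is the Claim_ definition above) =====
theorem dfa_string_run_spec : Claim_equal_dfa_string_run := by
  unfold Claim_equal_dfa_string_run
  intro text pos _hDom hPre
  unfold Spec_dfa_string_run dfa_string_run dfa_string_run_alt
  by_cases hge : pos ≥ PySem.Str.len text
  · rw [if_pos hge, if_pos hge]
  · rw [if_neg hge, if_neg hge]
    rcases h : PySem.Str.pyGet? text pos with _ | oq
    · rfl
    · show ((if ¬ (oq = '"' ∨ oq = '\'') then ((none, none) : Option String × Option String)
        else pvDfaLoopA text pos oq (if oq = '"' then "ESC_D" else "ESC_S")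
          (if oq = '"' then "OPEN_D" else "OPEN_S") (pos + 1)))
        = (if oq ≠ '"' ∧ oq ≠ '\'' then ((none, none) : Option String × Option String)
        else match pvFindClose text oq (pos + 1) with
         | none => (some "ERROR", some (PySem.Str.slice text (some pos) none))
         | some e => (some "STRING", some (PySem.Str.slice text (some pos) (some (e + 1)))))
      by_cases hq : oq = '"' ∨ oq = '\''
      · rw [if_neg (not_not_intro hq),
          if_neg (by rcases hq with h | h <;> simp [h] :
            ¬ (oq ≠ '"' ∧ oq ≠ '\''))]
        exact pvLoop_eq text pos oq hq _ _
          (by rcases hq with h | h <;> simp [h])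
          (by rcases hq with h | h <;> simp [h])
          (by rcases hq with h | h <;> simp [h])
          (PySem.Str.len text - (pos + 1)).toNat (pos + 1)
          (by unfold Pre_dfa_string_run at hPre; omega) (le_refl _)
      · rw [if_pos hq, if_pos (by push Not at hq; exact hq)]
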